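-- pv_equiv track=rewrite | github.com/coldbeeen/cote_study | boj/Greedy/1802_taeho.py | check
-- ===== SOURCE A (Python) =====
-- def check(val):
--     if len(val) <= 1:
--         return True
--
--     mid = len(val)//2 # 중앙 인덱스
--     left = val[:mid] # 분할
--
--     # 맞은편 인덱스랑 달라야 함(out 반대는 in)
--     for i in range(mid):
--         if val[i] == val[-i-1]:
--             return False # 같은 경우 못접음
--
--     return check(left)
-- ===== SOURCE B (Python) =====
-- def check(val):
--     # Iteratively collect the halving level lengths, then test all required
--     # mismatches in one flat pass over the original string (no slicing, no recursion).
--     levels = []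
--     n = len(val)
--     while n > 1:
--         levels.append(n)
--         n //= 2
--     return all(val[i] != val[L - 1 - i] for L in levels for i in range(L // 2))
-- ===== Notes on version B (the rewrite author's own statement) =====
-- stated objective: alternative
-- what changed: Replaces the recursive slice-and-descend with an iterative precomputation of the halving level lengths followed by one flat all() over (level, index) pairs on the original string, with no slicing and no recursion.
import Mathlib
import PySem

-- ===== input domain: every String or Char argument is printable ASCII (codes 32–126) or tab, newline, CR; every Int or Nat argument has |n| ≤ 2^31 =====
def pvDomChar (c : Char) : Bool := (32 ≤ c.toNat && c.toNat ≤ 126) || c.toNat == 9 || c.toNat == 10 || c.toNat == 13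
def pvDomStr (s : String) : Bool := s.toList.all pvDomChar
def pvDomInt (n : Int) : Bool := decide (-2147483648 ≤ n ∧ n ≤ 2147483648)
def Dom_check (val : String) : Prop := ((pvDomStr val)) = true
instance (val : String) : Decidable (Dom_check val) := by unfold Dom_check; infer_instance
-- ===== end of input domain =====

-- B replaces A's recursive slice-and-descend by an iterative precomputation of the
-- halving level lengths followed by one flat pass over the original string (alternative decomposition, same cost).


-- ===== PORT A =====
-- recursive: compare val[i] with val[-i-1] for i < mid, then recurse on val[:mid]
def checkGoA (cs : List Char) : Bool :=
  if cs.length ≤ 1 then true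
  else
    let mid := cs.length / 2
    let left := PySem.List.slice cs none (some (mid : Int))   -- val[:mid]
    if (PySem.List.pyRange 0 (mid : Int) 1).any
        (fun i => PySem.List.pyGet? cs i == PySem.List.pyGet? cs (-i - 1)) then
      false
    else
      checkGoA left
termination_by cs.length
decreasing_by
  simp only [PySem.List.slice_to_natCast, List.length_take]
  omega

def check (val : String) : Bool := checkGoA val.toList

-- ===== PORT B =====
-- the while-loop collecting the level lengths n, n//2, … (> 1)
def levelsB (n : Nat) : List Nat :=
  if n > 1 then n :: levelsB (n / 2) else []

-- the flat  all(val[i] != val[L-1-i] for L in levels for i in range(L//2))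
def check_alt (val : String) : Bool :=
  let cs := val.toList
  (levelsB cs.length).all (fun L =>
    (List.range (L / 2)).all (fun i => cs[i]? != cs[L - 1 - i]?))

-- ===== PRECONDITION & SPEC =====
def Spec_check (val : String) (out : Bool) : Prop := out = check_alt val
instance (val : String) (out : Bool) : Decidable (Spec_check val out) := by unfold Spec_check; infer_instance

-- ===== CLAIM (what is proved, stated in full; the proofs are below) =====
def Claim_equal_check : Prop := ∀ (val : String), Dom_check val → Spec_check val (check val)

-- ===== LEMMAS AND PROOFS =====

theorem all_congr' {α : Type} {l : List α} {p q : α → Bool}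
    (h : ∀ x ∈ l, p x = q x) : l.all p = l.all q := by
  induction l with
  | nil => rfl
  | cons a t ih =>
    simp only [List.all_cons]
    rw [h a (by simp), ih (fun x hx => h x (by simp [hx]))]

-- every level length produced from m is ≤ m
theorem levelsB_le {m L : Nat} (h : L ∈ levelsB m) : L ≤ m := by
  induction m using Nat.strong_induction_on with
  | _ m ih =>
    rw [levelsB] at h
    split at h
    · rcases List.mem_cons.mp h with h | h
      · omega
      · have := ih (m / 2) (by omega) h; omega
    · simp at h

-- the per-level test only looks at indices < L, so it is stable under taking a prefix of length ≥ L
theorem levelTest_take (cs : List Char) (mid L : Nat) (hL : L ≤ mid) :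
    (List.range (L / 2)).all (fun i => (cs.take mid)[i]? != (cs.take mid)[L - 1 - i]?)
      = (List.range (L / 2)).all (fun i => cs[i]? != cs[L - 1 - i]?) := by
  apply all_congr'
  intro i hi
  have hi' : i < L / 2 := List.mem_range.mp hi
  have h1 : i < mid := by omega
  have h2 : L - 1 - i < mid := by omega
  rw [List.getElem?_take_of_lt h1, List.getElem?_take_of_lt h2]

-- A's level-n scan equals the negation of B's level-n test
theorem scan_eq (cs : List Char) (h2 : 2 ≤ cs.length) :
    (PySem.List.pyRange 0 ((cs.length / 2 : Nat) : Int) 1).any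
        (fun i => PySem.List.pyGet? cs i == PySem.List.pyGet? cs (-i - 1))
      = !((List.range (cs.length / 2)).all
          (fun i => cs[i]? != cs[cs.length - 1 - i]?)) := by
  rw [PySem.List.pyRange_one, List.any_map, List.any_eq_not_all_not]
  congr 1
  rw [show (((cs.length / 2 : Nat) : Int) - 0).toNat = cs.length / 2 by omega]
  apply all_congr'
  intro i hi
  have hi' : i < cs.length / 2 := List.mem_range.mp hi
  simp only [Function.comp]
  rw [show -((0 : Int) + (i : Int)) - 1 = -(((i + 1 : Nat) : Int)) by push_cast; ring]
  rw [show (0 : Int) + (i : Int) = ((i : Nat) : Int) by ring, PySem.List.pyGet?_natCast]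
  rw [PySem.List.pyGet?_neg_natCast (xs := cs) (k := i + 1) (by omega) (by omega)]
  rw [show cs.length - (i + 1) = cs.length - 1 - i by omega]
  rfl

-- main lemma: A's recursion computes B's flat all over the level lengths
theorem checkGoA_eq (cs : List Char) :
    checkGoA cs
      = (levelsB cs.length).all
          (fun L => (List.range (L / 2)).all (fun i => cs[i]? != cs[L - 1 - i]?)) := by
  generalize hn : cs.length = n
  induction n using Nat.strong_induction_on generalizing cs with
  | _ n ih =>
    subst hn
    rw [checkGoA, levelsB]
    by_cases h1 : cs.length ≤ 1
    · simp [h1, show ¬ cs.length > 1 by omega]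
    · have h2 : 2 ≤ cs.length := by omega
      simp only [if_neg h1, if_pos (show cs.length > 1 by omega), List.all_cons]
      rw [scan_eq cs h2]
      set mid := cs.length / 2 with hmid
      have hlen : (PySem.List.slice cs none (some ((mid : Nat) : Int))).length = mid := by
        rw [PySem.List.slice_to_natCast, List.length_take]; omega
      rw [ih mid (by omega) _ hlen]
      rw [PySem.List.slice_to_natCast]
      have hall : (levelsB mid).all
            (fun L => (List.range (L / 2)).all
              (fun i => (cs.take mid)[i]? != (cs.take mid)[L - 1 - i]?))
          = (levelsB mid).all
            (fun L => (List.range (L / 2)).all (fun i => cs[i]? != cs[L - 1 - i]?)) := by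
        apply all_congr'
        intro L hL
        exact levelTest_take cs mid L (levelsB_le hL)
      rw [hall]
      cases hb : (List.range mid).all (fun i => cs[i]? != cs[cs.length - 1 - i]?) <;> simp

-- ===== VERDICT (by name: the statement is the Claim_ definition above) =====
theorem check_spec : Claim_equal_check := by
  intro val _
  unfold Spec_check check check_alt
  exact checkGoA_eq val.toList
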